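-- pv_equiv track=rewrite | github.com/zhliu9802/latti-ai | inference/model_generator/layers/poly_relu.py | _compute_power_info
-- ===== SOURCE A (Python) =====
-- def _compute_power_info(order):
--     """Optimal power decomposition tree. Matches C++ compute_all_powers."""
--     info = {1: (0, 0, 0)}  # n -> (depth, decomp_a, decomp_b)
--     for n in range(2, order + 1):
--         best_depth = float('inf')
--         best_a, best_b = 1, n - 1
--         for a in range(1, n // 2 + 1):
--             b = n - a
--             depth = max(info[a][0], info[b][0]) + 1
--             if depth < best_depth:
--                 best_depth = depth
--                 best_a, best_b = a, b
--             elif depth == best_depth and abs(a - b) < abs(best_a - best_b):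
--                 best_a, best_b = a, b
--         info[n] = (best_depth, best_a, best_b)
--     return info
-- ===== SOURCE B (Python) =====
-- def _compute_power_info(order):
--     """Closed form: the optimal depth for n is ceil(log2(n)) = (n-1).bit_length(),
--     achieved by the balanced split (n//2, n - n//2), which is also the split the
--     tie-breaking in the search picks.  One O(1) step per n instead of an O(n) scan."""
--     info = {1: (0, 0, 0)}
--     for n in range(2, order + 1):
--         info[n] = ((n - 1).bit_length(), n // 2, n - n // 2)
--     return info
-- ===== Notes on version B (the rewrite author's own statement) =====
-- stated objective: faster
-- what changed: Replaces the inner scan over all splits (a, n-a) by the closed form depth = (n-1).bit_length() with the balanced split (n//2, n-n//2), proved to be exactly the minimiser with A's tie-breaking.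
import Mathlib
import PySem

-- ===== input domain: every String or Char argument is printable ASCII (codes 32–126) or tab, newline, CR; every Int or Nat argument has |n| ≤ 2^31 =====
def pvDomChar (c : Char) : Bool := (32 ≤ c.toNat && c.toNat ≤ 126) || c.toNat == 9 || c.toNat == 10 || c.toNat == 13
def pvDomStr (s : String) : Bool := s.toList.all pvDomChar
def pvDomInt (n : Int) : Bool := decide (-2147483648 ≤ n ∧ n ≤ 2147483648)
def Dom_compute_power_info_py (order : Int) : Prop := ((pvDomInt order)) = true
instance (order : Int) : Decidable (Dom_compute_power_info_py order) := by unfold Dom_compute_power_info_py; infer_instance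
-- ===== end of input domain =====

-- B replaces A's O(n) inner scan over all splits by the closed form
-- depth = bit_length(n-1), split = (n//2, n - n//2): O(order) instead of O(order^2).

-- ===== PORT A =====
-- One step of the inner `for a in range(1, n // 2 + 1)` loop.  `best_depth` starts as
-- float('inf'), modelled as `none`: every later value is an int, and `depth < inf` holds.
def pvInnerStep_A (n : Int) (info : PySem.Dict Int (Int × Int × Int))
    (st : Option Int × Int × Int) (a : Int) : Option Int × Int × Int :=
  let b := n - a
  let depth := max (info.getD a (0, 0, 0)).1 (info.getD b (0, 0, 0)).1 + 1
  match st with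
  | (none, _, _) => (some depth, a, b)          -- depth < inf: first branch fires
  | (some bd, ba, bb) =>
    if depth < bd then (some depth, a, b)
    else if depth = bd ∧ |a - b| < |ba - bb| then (some bd, a, b)
    else (some bd, ba, bb)

-- The `getD` defaults are never used: info[a], info[b] exist for every reached key
-- (1 ≤ a, b < n), and for n ≥ 2 the inner loop is nonempty, so the best depth is `some`.
def compute_power_info_py (order : Int) : List (Int × Int × Int × Int) :=
  let info0 : PySem.Dict Int (Int × Int × Int) := PySem.Dict.ofList [(1, (0, 0, 0))]
  let info := (PySem.List.pyRange 2 (order + 1) 1).foldl (fun info n =>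
    let st := (PySem.List.pyRange 1 (PySem.Int.floordiv n 2 + 1) 1).foldl
      (pvInnerStep_A n info) (none, 1, n - 1)
    info.insert n (st.1.getD 0, st.2.1, st.2.2)) info0
  info.items

-- ===== PORT B =====
def compute_power_info_py_alt (order : Int) : List (Int × Int × Int × Int) :=
  ((PySem.List.pyRange 2 (order + 1) 1).foldl (fun info n =>
      info.insert n ((PySem.Int.bitLength (n - 1) : Int), PySem.Int.floordiv n 2,
        n - PySem.Int.floordiv n 2))
    (PySem.Dict.ofList [(1, (0, 0, 0))] : PySem.Dict Int (Int × Int × Int))).items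

-- ===== PRECONDITION & SPEC =====
def Spec_compute_power_info_py (order : Int) (out : List (Int × Int × Int × Int)) : Prop := out = compute_power_info_py_alt order
instance (order : Int) (out : List (Int × Int × Int × Int)) : Decidable (Spec_compute_power_info_py order out) := by unfold Spec_compute_power_info_py; infer_instance

-- ===== CLAIM (what is proved, stated in full; the proofs are below) =====
def Claim_equal_compute_power_info_py : Prop := ∀ (order : Int), Dom_compute_power_info_py order → Spec_compute_power_info_py order (compute_power_info_py order)

-- ===== LEMMAS AND PROOFS =====

-- depth stored for key m : both programs store bit_length(m-1)
def pvD (m : Int) : Int := (PySem.Int.bitLength (m - 1) : Int)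

-- value stored for key m
def pvVal (m : Int) : Int × Int × Int :=
  if m = 1 then (0, 0, 0) else (pvD m, PySem.Int.floordiv m 2, m - PySem.Int.floordiv m 2)

lemma pvD_nonneg (m : Int) : 0 ≤ pvD m := by
  simp [pvD]

lemma pvVal_fst (m : Int) : (pvVal m).1 = pvD m := by
  by_cases h : m = 1 <;> simp [pvVal, pvD, h, PySem.Int.bitLength_zero]

lemma bitLength_mono {x y : Int} (hx : 0 ≤ x) (hxy : x ≤ y) :
    PySem.Int.bitLength x ≤ PySem.Int.bitLength y := by
  by_cases hx0 : x = 0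
  · simp [hx0, PySem.Int.bitLength_zero]
  · by_contra h
    push Not at h
    have h1 := PySem.Int.two_pow_bitLength_le x hx0
    have h2 := PySem.Int.lt_two_pow_bitLength y
    have hxa : x.natAbs ≤ y.natAbs := by
      have : 0 ≤ y := le_trans hx hxy
      omega
    have hpow : (2 : ℕ) ^ PySem.Int.bitLength y ≤ 2 ^ (PySem.Int.bitLength x - 1) := by
      apply Nat.pow_le_pow_right (by norm_num)
      omega
    omega

lemma pvD_mono {x y : Int} (hx : 1 ≤ x) (hxy : x ≤ y) : pvD x ≤ pvD y := by
  have := bitLength_mono (x := x - 1) (y := y - 1) (by omega) (by omega)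
  simp only [pvD]
  exact_mod_cast this

-- halving: bit_length(n-1) = bit_length((n - n//2) - 1) + 1 for n ≥ 2
lemma pvD_halve {n : Int} (hn : 2 ≤ n) :
    pvD n = pvD (n - PySem.Int.floordiv n 2) + 1 := by
  have h1 : (0 : Int) < n - 1 := by omega
  have h2 : n - PySem.Int.floordiv n 2 - 1 = PySem.Int.floordiv (n - 1) 2 := by
    have ha := PySem.Int.floordiv_mul_add_mod n 2
    have hb := PySem.Int.floordiv_mul_add_mod (n - 1) 2
    have hma := PySem.Int.mod_lt n (b := 2) (by norm_num)
    have hma' := PySem.Int.mod_nonneg n (b := 2) (by norm_num)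
    have hmb := PySem.Int.mod_lt (n - 1) (b := 2) (by norm_num)
    have hmb' := PySem.Int.mod_nonneg (n - 1) (b := 2) (by norm_num)
    omega
  have := PySem.Int.bitLength_of_pos h1
  simp only [pvD, h2]
  omega

lemma pvStep_none (n : Int) (info : PySem.Dict Int (Int × Int × Int)) (ba bb a : Int) :
    pvInnerStep_A n info (none, ba, bb) a
      = (some (max (info.getD a (0, 0, 0)).1 (info.getD (n - a) (0, 0, 0)).1 + 1), a, n - a) := rfl

lemma pvStep_some (n : Int) (info : PySem.Dict Int (Int × Int × Int)) (bd ba bb a : Int) :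
    pvInnerStep_A n info (some bd, ba, bb) a
      = (if max (info.getD a (0, 0, 0)).1 (info.getD (n - a) (0, 0, 0)).1 + 1 < bd
           then (some (max (info.getD a (0, 0, 0)).1 (info.getD (n - a) (0, 0, 0)).1 + 1), a, n - a)
         else if max (info.getD a (0, 0, 0)).1 (info.getD (n - a) (0, 0, 0)).1 + 1 = bd
                ∧ |a - (n - a)| < |ba - bb| then (some bd, a, n - a)
         else (some bd, ba, bb)) := rfl

lemma pvD_one : pvD 1 = 0 := by simp [pvD, PySem.Int.bitLength_zero]

-- the inner-loop invariant: after scanning a = 1 .. j the state is (some (pvD (n-j) + 1), j, n-j)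
lemma inner_loop_inv (n : Int) (info : PySem.Dict Int (Int × Int × Int))
    (hn : 2 ≤ n)
    (hinfo : ∀ m : Int, 1 ≤ m → m < n → (info.getD m (0, 0, 0)).1 = pvD m) :
    ∀ j : Int, 1 ≤ j → j ≤ PySem.Int.floordiv n 2 →
      (PySem.List.pyRange 1 (j + 1)).foldl (pvInnerStep_A n info) (none, 1, n - 1)
        = (some (pvD (n - j) + 1), j, n - j) := by
  intro j hj
  induction j, hj using Int.le_induction with
  | base =>
    intro _
    rw [PySem.List.pyRange_one_singleton]
    simp only [List.foldl, pvStep_none]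
    rw [hinfo 1 (le_refl _) (by omega), hinfo (n - 1) (by omega) (by omega), pvD_one,
      max_eq_right (pvD_nonneg _)]
  | succ j hj ih =>
    intro hle
    have hj2 : (j + 1) * 2 ≤ n := (PySem.Int.le_floordiv_iff_mul_le (by norm_num)).mp hle
    have ihe := ih (by omega)
    rw [PySem.List.pyRange_one_succ_right (by omega : (1:Int) ≤ j + 1), List.foldl_append, ihe]
    simp only [List.foldl, pvStep_some]
    rw [hinfo (j + 1) (by omega) (by omega), hinfo (n - (j + 1)) (by omega) (by omega),
      max_eq_right (pvD_mono (by omega) (by omega))]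
    have hmono : pvD (n - (j + 1)) ≤ pvD (n - j) := pvD_mono (by omega) (by omega)
    split_ifs with h1 h2
    · rfl
    · have : pvD (n - (j + 1)) = pvD (n - j) := by omega
      rw [this]
    · exfalso
      apply h2
      constructor
      · omega
      · rw [abs_of_nonpos (by omega : j + 1 - (n - (j + 1)) ≤ 0),
          abs_of_nonpos (by omega : j - (n - j) ≤ 0)]
        omega

-- packaging the inner loop: the value A computes for n is the closed form
lemma inner_loop_val (n : Int) (info : PySem.Dict Int (Int × Int × Int))
    (hn : 2 ≤ n)
    (hinfo : ∀ m : Int, 1 ≤ m → m < n → (info.getD m (0, 0, 0)).1 = pvD m) :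
    (PySem.List.pyRange 1 (PySem.Int.floordiv n 2 + 1)).foldl
      (pvInnerStep_A n info) (none, 1, n - 1)
      = (some (pvD n), PySem.Int.floordiv n 2, n - PySem.Int.floordiv n 2) := by
  have h1 : (1:Int) ≤ PySem.Int.floordiv n 2 :=
    (PySem.Int.le_floordiv_iff_mul_le (by norm_num)).mpr (by omega)
  rw [inner_loop_inv n info hn hinfo _ h1 (le_refl _), ← pvD_halve hn]


-- the outer folds of the two ports agree, and the A-dict carries the invariant
lemma outer_inv (k : Int) (hk : 1 ≤ k) :
    ((PySem.List.pyRange 2 (k + 1)).foldl (fun info n =>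
        let st := (PySem.List.pyRange 1 (PySem.Int.floordiv n 2 + 1)).foldl
          (pvInnerStep_A n info) (none, 1, n - 1)
        info.insert n (st.1.getD 0, st.2.1, st.2.2))
      (PySem.Dict.ofList [(1, (0, 0, 0))])
      = (PySem.List.pyRange 2 (k + 1)).foldl (fun info n =>
          info.insert n ((PySem.Int.bitLength (n - 1) : Int), PySem.Int.floordiv n 2,
            n - PySem.Int.floordiv n 2))
        (PySem.Dict.ofList [(1, (0, 0, 0))]))
    ∧ (∀ m : Int, 1 ≤ m → m ≤ k →
        (((PySem.List.pyRange 2 (k + 1)).foldl (fun info n =>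
            let st := (PySem.List.pyRange 1 (PySem.Int.floordiv n 2 + 1)).foldl
              (pvInnerStep_A n info) (none, 1, n - 1)
            info.insert n (st.1.getD 0, st.2.1, st.2.2))
          (PySem.Dict.ofList [(1, (0, 0, 0))])).getD m (0, 0, 0)) = pvVal m) := by
  induction k, hk using Int.le_induction with
  | base =>
    constructor
    · rfl
    · intro m h1 h2
      have : m = 1 := by omega
      subst this
      decide
  | succ k hk ih =>
    obtain ⟨ih1, ih2⟩ := ih
    have hinfo : ∀ m : Int, 1 ≤ m → m < k + 1 →
        ((((PySem.List.pyRange 2 (k + 1)).foldl (fun info n =>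
              let st := (PySem.List.pyRange 1 (PySem.Int.floordiv n 2 + 1)).foldl
                (pvInnerStep_A n info) (none, 1, n - 1)
              info.insert n (st.1.getD 0, st.2.1, st.2.2))
            (PySem.Dict.ofList [(1, (0, 0, 0))])).getD m (0, 0, 0))).1 = pvD m := by
      intro m h1 h2
      rw [ih2 m h1 (by omega), pvVal_fst]
    rw [PySem.List.pyRange_one_succ_right (by omega : (2:Int) ≤ k + 1)]
    simp only [List.foldl_append, List.foldl]
    rw [inner_loop_val (k + 1) _ (by omega) hinfo]
    refine ⟨?_, ?_⟩
    · rw [ih1]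
      rfl
    · intro m h1 h2
      rw [PySem.Dict.getD_insert]
      by_cases hm : m = k + 1
      · rw [if_pos hm, hm]
        simp only [pvVal, if_neg (show ¬ (k + 1 = 1) by omega)]
        rfl
      · rw [if_neg hm]
        exact ih2 m h1 (by omega)

-- ===== VERDICT (by name: the statement is the Claim_ definition above) =====
theorem compute_power_info_py_spec : Claim_equal_compute_power_info_py := by
  intro order _
  unfold Spec_compute_power_info_py compute_power_info_py compute_power_info_py_alt
  by_cases h : 1 ≤ order
  · simp only []
    rw [(outer_inv order h).1]
  · have : order + 1 ≤ 2 := by omega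
    rw [PySem.List.pyRange_one_eq_nil this]
    simp [List.foldl]
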